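-- pv_equiv track=rewrite | github.com/krxtaps/hackbelfast-14 | backend/scripts/ingest_foursquare_pois.py | _estimate_hours_for_category
-- ===== SOURCE A (Python) =====
-- from typing import Any, Dict, Iterable, List, Optional, Tuple
--
-- def _estimate_hours_for_category(category: str) -> Tuple[Optional[str], str]:
--     """
--     Returns (opening_hours_string, hours_status) based on category.
--     Used as a fallback for demo purposes.
--     """
--     cat = category.lower()
--
--     # 24/7 locations
--     if any(x in cat for x in ["police", "hospital", "fire station", "hotel", "hostel", "emergency", "medical", "doctor"]):
--         return "00:00-24:00", "verified_24_7"
--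
--     # Late Night Known (Demo hack)
--     if any(x in cat for x in ["night club", "bar", "pub", "disco"]):
--         return "21:00-03:00", "late_night_known"
--
--     # Likely Late
--     if any(x in cat for x in ["pharmacy", "drugstore", "convenience", "gas station"]):
--         return "08:00-22:00", "late_night_likely"
--
--     # Extended Hours
--     if any(x in cat for x in ["supermarket", "grocery", "gym", "fitness"]):
--         return "06:00-22:00", "guestimated_extended_hours"
--
--     # Standard / Unknown
--     if any(x in cat for x in ["library", "university", "college", "school", "park"]):
--         return "09:00-18:00", "hours_unknown"
--
--     return None, "hours_unknown"
-- ===== SOURCE B (Python) =====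
-- _GROUPS = [
--     (["police", "hospital", "fire station", "hotel", "hostel", "emergency", "medical", "doctor"],
--      ("00:00-24:00", "verified_24_7")),
--     (["night club", "bar", "pub", "disco"], ("21:00-03:00", "late_night_known")),
--     (["pharmacy", "drugstore", "convenience", "gas station"], ("08:00-22:00", "late_night_likely")),
--     (["supermarket", "grocery", "gym", "fitness"], ("06:00-22:00", "guestimated_extended_hours")),
--     (["library", "university", "college", "school", "park"], ("09:00-18:00", "hours_unknown")),
-- ]
-- # flat keyword -> priority index
-- _KEYWORD_PRIORITY = [(kw, i) for i, (kws, _) in enumerate(_GROUPS) for kw in kws]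
--
-- def _estimate_hours_for_category(category):
--     cat = category.lower()
--     best = min((p for kw, p in _KEYWORD_PRIORITY if kw in cat), default=None)
--     if best is None:
--         return None, "hours_unknown"
--     hours, status = _GROUPS[best][1]
--     return hours, status
-- ===== Notes on version B (the rewrite author's own statement) =====
-- stated objective: alternative
-- what changed: Instead of A's five ordered short-circuit branch blocks, B flattens all keywords into one keyword-to-priority index, collects the priorities of ALL matching keywords in a single pass, and returns the outcome of the minimum matched priority (none matched = unknown).
import Mathlib
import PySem

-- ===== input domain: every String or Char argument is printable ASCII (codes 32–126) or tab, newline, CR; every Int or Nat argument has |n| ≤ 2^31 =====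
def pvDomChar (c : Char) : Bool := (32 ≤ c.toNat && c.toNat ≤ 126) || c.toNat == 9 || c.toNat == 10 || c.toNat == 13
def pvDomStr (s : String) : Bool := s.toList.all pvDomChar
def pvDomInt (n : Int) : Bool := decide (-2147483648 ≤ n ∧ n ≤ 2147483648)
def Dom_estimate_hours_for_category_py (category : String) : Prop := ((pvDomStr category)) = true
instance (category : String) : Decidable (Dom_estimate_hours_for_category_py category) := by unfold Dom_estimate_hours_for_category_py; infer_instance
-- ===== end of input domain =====

-- B replaces A's five ordered short-circuit branch blocks by a flat keyword->priority index: it collects the priorities of all matching keywords in one pass and returns the outcome of the minimum priority (alternative algorithm, same cost).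


-- ===== PORT A =====
def estimate_hours_for_category_py (category : String) : Option String × String :=
  let cat := PySem.Str.lower category
  if ["police", "hospital", "fire station", "hotel", "hostel", "emergency", "medical", "doctor"].any (fun x => PySem.Str.isIn x cat) then
    (some "00:00-24:00", "verified_24_7")
  else if ["night club", "bar", "pub", "disco"].any (fun x => PySem.Str.isIn x cat) then
    (some "21:00-03:00", "late_night_known")
  else if ["pharmacy", "drugstore", "convenience", "gas station"].any (fun x => PySem.Str.isIn x cat) then
    (some "08:00-22:00", "late_night_likely")
  else if ["supermarket", "grocery", "gym", "fitness"].any (fun x => PySem.Str.isIn x cat) then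
    (some "06:00-22:00", "guestimated_extended_hours")
  else if ["library", "university", "college", "school", "park"].any (fun x => PySem.Str.isIn x cat) then
    (some "09:00-18:00", "hours_unknown")
  else
    (none, "hours_unknown")

-- ===== PORT B =====
-- B: flat keyword -> priority index; min over the priorities of ALL matching keywords
def pvGroups : List (List String × (String × String)) :=
  [ (["police", "hospital", "fire station", "hotel", "hostel", "emergency", "medical", "doctor"], ("00:00-24:00", "verified_24_7"))
  , (["night club", "bar", "pub", "disco"], ("21:00-03:00", "late_night_known"))
  , (["pharmacy", "drugstore", "convenience", "gas station"], ("08:00-22:00", "late_night_likely"))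
  , (["supermarket", "grocery", "gym", "fitness"], ("06:00-22:00", "guestimated_extended_hours"))
  , (["library", "university", "college", "school", "park"], ("09:00-18:00", "hours_unknown")) ]

def pvKeywordPriority : List (String × Int) :=
  (PySem.List.enumerate pvGroups).flatMap (fun ip => ip.2.1.map (fun kw => (kw, ip.1)))

def estimate_hours_for_category_py_alt (category : String) : Option String × String :=
  let cat := PySem.Str.lower category
  match PySem.List.min? (pvKeywordPriority.filterMap (fun kp => if PySem.Str.isIn kp.1 cat then some kp.2 else none)) (fun p => p) with
  | none => (none, "hours_unknown")
  | some p =>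
      let hs := (PySem.List.pyGetD pvGroups p ([], ("", ""))).2
      (some hs.1, hs.2)

-- ===== PRECONDITION & SPEC =====
def Spec_estimate_hours_for_category_py (category : String) (out : Option String × String) : Prop := out = estimate_hours_for_category_py_alt category
instance (category : String) (out : Option String × String) : Decidable (Spec_estimate_hours_for_category_py category out) := by unfold Spec_estimate_hours_for_category_py; infer_instance

-- ===== CLAIM (what is proved, stated in full; the proofs are below) =====
def Claim_equal_estimate_hours_for_category_py : Prop := ∀ (category : String), Dom_estimate_hours_for_category_py category → Spec_estimate_hours_for_category_py category (estimate_hours_for_category_py category)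

-- ===== LEMMAS AND PROOFS =====

-- a filterMap whose hits are a constant is a replicate of the hit count
lemma pv_filterMap_if_const (p : String → Bool) (c : Int) (l : List String) :
    l.filterMap (fun x => if p x then some c else none) = List.replicate (l.countP p) c := by
  induction l with
  | nil => rfl
  | cons x t ih =>
      by_cases h : p x = true <;>
        simp [h, ih, List.replicate_succ]

-- min? (with identity key) of a list whose least member is k
lemma pv_min?_eq_of (L : List Int) (k : Int) (hk : k ∈ L) (hall : ∀ y ∈ L, k ≤ y) :
    PySem.List.min? L (fun x => x) = some k := by
  cases h : PySem.List.min? L (fun x => x) with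
  | none =>
      rw [PySem.List.min?_eq_none_iff] at h
      subst h; cases hk
  | some m =>
      have hmem : m ∈ L := PySem.List.min?_mem h
      have h1 : m ≤ k := by simpa using PySem.List.min?_isMin h k hk
      have h2 : k ≤ m := hall m hmem
      exact congrArg some (le_antisymm h1 h2)

-- the flat keyword table decomposed into its five groups
lemma pv_table_eq :
    pvKeywordPriority =
      (["police", "hospital", "fire station", "hotel", "hostel", "emergency", "medical", "doctor"].map (fun kw => (kw, (0 : Int)))) ++
      (["night club", "bar", "pub", "disco"].map (fun kw => (kw, (1 : Int)))) ++
      (["pharmacy", "drugstore", "convenience", "gas station"].map (fun kw => (kw, (2 : Int)))) ++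
      (["supermarket", "grocery", "gym", "fitness"].map (fun kw => (kw, (3 : Int)))) ++
      (["library", "university", "college", "school", "park"].map (fun kw => (kw, (4 : Int)))) := by
  rfl

-- the matched-priority list is a concatenation of replicates, one per group
lemma pv_matched_eq (cat : String) :
    pvKeywordPriority.filterMap (fun kp => if PySem.Str.isIn kp.1 cat then some kp.2 else none) =
      List.replicate (["police", "hospital", "fire station", "hotel", "hostel", "emergency", "medical", "doctor"].countP (fun x => PySem.Str.isIn x cat)) 0 ++
      List.replicate (["night club", "bar", "pub", "disco"].countP (fun x => PySem.Str.isIn x cat)) 1 ++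
      List.replicate (["pharmacy", "drugstore", "convenience", "gas station"].countP (fun x => PySem.Str.isIn x cat)) 2 ++
      List.replicate (["supermarket", "grocery", "gym", "fitness"].countP (fun x => PySem.Str.isIn x cat)) 3 ++
      List.replicate (["library", "university", "college", "school", "park"].countP (fun x => PySem.Str.isIn x cat)) 4 := by
  rw [pv_table_eq]
  simp only [List.filterMap_append, List.filterMap_map, Function.comp_def]
  rw [pv_filterMap_if_const, pv_filterMap_if_const, pv_filterMap_if_const,
      pv_filterMap_if_const, pv_filterMap_if_const]

-- any = true gives membership of the group's priority in its replicate block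
lemma pv_mem_replicate_of_any (l : List String) (cat : String) (c : Int)
    (h : l.any (fun x => PySem.Str.isIn x cat) = true) :
    c ∈ List.replicate (l.countP (fun x => PySem.Str.isIn x cat)) c := by
  rw [List.mem_replicate]
  refine ⟨?_, rfl⟩
  rw [List.any_eq_true] at h
  obtain ⟨x, hx, hpx⟩ := h
  have : 0 < l.countP (fun x => PySem.Str.isIn x cat) := by
    rw [List.countP_pos_iff]; exact ⟨x, hx, hpx⟩
  omega

lemma pv_replicate_nil_of_not_any (l : List String) (cat : String) (c : Int)
    (h : ¬ l.any (fun x => PySem.Str.isIn x cat) = true) :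
    List.replicate (l.countP (fun x => PySem.Str.isIn x cat)) c = [] := by
  have : l.countP (fun x => PySem.Str.isIn x cat) = 0 := by
    rw [List.countP_eq_zero]
    intro a ha hpa
    exact h (List.any_eq_true.mpr ⟨a, ha, hpa⟩)
  rw [this, List.replicate_zero]

-- ===== VERDICT (by name: the statement is the Claim_ definition above) =====
theorem estimate_hours_for_category_py_spec : Claim_equal_estimate_hours_for_category_py := by
  intro category _
  show estimate_hours_for_category_py category = estimate_hours_for_category_py_alt category
  simp only [estimate_hours_for_category_py, estimate_hours_for_category_py_alt]
  rw [pv_matched_eq (PySem.Str.lower category)]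
  generalize PySem.Str.lower category = cat
  by_cases h1 : (["police", "hospital", "fire station", "hotel", "hostel", "emergency", "medical", "doctor"].any (fun x => PySem.Str.isIn x cat)) = true
  · rw [pv_min?_eq_of _ 0
      (by simp only [List.mem_append]
          exact Or.inl (Or.inl (Or.inl (Or.inl (pv_mem_replicate_of_any _ cat 0 h1)))))
      (by intro y hy
          simp only [List.mem_append] at hy
          rcases hy with ((((h | h) | h) | h) | h) <;> rw [List.eq_of_mem_replicate h] <;> decide)]
    rw [if_pos h1]
    rfl
  · rw [pv_replicate_nil_of_not_any _ cat 0 h1]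
    by_cases h2 : (["night club", "bar", "pub", "disco"].any (fun x => PySem.Str.isIn x cat)) = true
    · rw [pv_min?_eq_of _ 1
        (by simp only [List.nil_append, List.mem_append]
            exact Or.inl (Or.inl (Or.inl (pv_mem_replicate_of_any _ cat 1 h2))))
        (by intro y hy
            simp only [List.nil_append, List.mem_append] at hy
            rcases hy with (((h | h) | h) | h) <;> rw [List.eq_of_mem_replicate h] <;> decide)]
      rw [if_neg h1, if_pos h2]
      rfl
    · rw [pv_replicate_nil_of_not_any _ cat 1 h2]
      by_cases h3 : (["pharmacy", "drugstore", "convenience", "gas station"].any (fun x => PySem.Str.isIn x cat)) = true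
      · rw [pv_min?_eq_of _ 2
          (by simp only [List.nil_append, List.mem_append]
              exact Or.inl (Or.inl (pv_mem_replicate_of_any _ cat 2 h3)))
          (by intro y hy
              simp only [List.nil_append, List.mem_append] at hy
              rcases hy with ((h | h) | h) <;> rw [List.eq_of_mem_replicate h] <;> decide)]
        rw [if_neg h1, if_neg h2, if_pos h3]
        rfl
      · rw [pv_replicate_nil_of_not_any _ cat 2 h3]
        by_cases h4 : (["supermarket", "grocery", "gym", "fitness"].any (fun x => PySem.Str.isIn x cat)) = true
        · rw [pv_min?_eq_of _ 3
            (by simp only [List.nil_append, List.mem_append]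
                exact Or.inl (pv_mem_replicate_of_any _ cat 3 h4))
            (by intro y hy
                simp only [List.nil_append, List.mem_append] at hy
                rcases hy with (h | h) <;> rw [List.eq_of_mem_replicate h] <;> decide)]
          rw [if_neg h1, if_neg h2, if_neg h3, if_pos h4]
          rfl
        · rw [pv_replicate_nil_of_not_any _ cat 3 h4]
          by_cases h5 : (["library", "university", "college", "school", "park"].any (fun x => PySem.Str.isIn x cat)) = true
          · rw [pv_min?_eq_of _ 4
              (by simp only [List.nil_append]
                  exact pv_mem_replicate_of_any _ cat 4 h5)
              (by intro y hy
                  simp only [List.nil_append] at hy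
                  rw [List.eq_of_mem_replicate hy])]
            rw [if_neg h1, if_neg h2, if_neg h3, if_neg h4, if_pos h5]
            rfl
          · rw [pv_replicate_nil_of_not_any _ cat 4 h5]
            rw [if_neg h1, if_neg h2, if_neg h3, if_neg h4, if_neg h5]
            rfl
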